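-- pv_equiv track=rewrite | github.com/banggeut01/MyGoalIsAdPlus | test/ex5.py | solution
-- ===== SOURCE A (Python) =====
-- def solution(dataSource, tags):
--     answer = []
--     isExist = dict()
--     for row in dataSource:
--         for x in range(1, len(row)):
--             isExist[(row[0], row[x])] = True
--     num = dict()
--     for row in dataSource:
--         for tag in tags:
--             if isExist.get((row[0], tag)):
--                 if num.get(row[0]): num[row[0]] += 1
--                 else: num[row[0]] = 1
--     tmp = []
--     for key, val in num.items():
--         tmp.append((val, key))
--     tmp = sorted(tmp, key=lambda x: x[1])
--     tmp = sorted(tmp, key=lambda x: x[0], reverse=True)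
--     answer = [x[1] for x in tmp]
--     return answer
-- ===== SOURCE B (Python) =====
-- def solution(dataSource, tags):
--     # one pass: per id, the set of its elements (pooled over rows) and its row count
--     elems = {}
--     count = {}
--     for row in dataSource:
--         if not row:
--             continue
--         k = row[0]
--         count[k] = count.get(k, 0) + 1
--         elems.setdefault(k, set()).update(row[1:])
--     pairs = []
--     for k, s in elems.items():
--         cnt = count[k] * sum(1 for t in tags if t in s)
--         if cnt:
--             pairs.append((cnt, k))
--     pairs.sort(key=lambda p: (-p[0], p[1]))
--     return [k for _, k in pairs]
-- ===== Notes on version B (the rewrite author's own statement) =====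
-- stated objective: faster
-- what changed: Instead of materialising a (id, element)->True dict and then re-scanning every row x tag pair, B aggregates once per id (element set + row count) in a single pass, computes each id's count as rowcount * matching-tag count per DISTINCT id, and orders with one sort on the tuple key (-count, id) instead of two stable sorts.
import Mathlib
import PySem

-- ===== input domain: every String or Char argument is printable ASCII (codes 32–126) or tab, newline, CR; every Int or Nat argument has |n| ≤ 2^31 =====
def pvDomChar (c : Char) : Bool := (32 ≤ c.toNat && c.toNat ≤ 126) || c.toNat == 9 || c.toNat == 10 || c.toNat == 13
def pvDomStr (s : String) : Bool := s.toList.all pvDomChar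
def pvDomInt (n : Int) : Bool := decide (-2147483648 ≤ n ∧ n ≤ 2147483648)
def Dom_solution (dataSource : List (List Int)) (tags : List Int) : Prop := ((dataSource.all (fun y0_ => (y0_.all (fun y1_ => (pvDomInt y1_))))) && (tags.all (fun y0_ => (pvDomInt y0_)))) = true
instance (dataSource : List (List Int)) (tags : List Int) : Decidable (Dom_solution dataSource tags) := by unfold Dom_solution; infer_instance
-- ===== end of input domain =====

-- B aggregates per distinct id (element set + row count) in one pass and sorts once on the
-- tuple key (-count, id), instead of A's (id,element)->True dict, row*tag re-scan and two stable sorts.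


-- ===== PORT A =====
-- row[0] / row[x] are ported with pyGetD (default 0): inside Pre_solution every such access is
-- in range (x ∈ [1, len(row)); row[0] is reached only for a nonempty row), where pyGetD is exact.
def solution (dataSource : List (List Int)) (tags : List Int) : List Int :=
  let isExist : PySem.Dict (Int × Int) Bool :=
    dataSource.foldl (fun d row =>
      (PySem.List.pyRange 1 (row.length : Int) 1).foldl (fun d x =>
        d.insert (PySem.List.pyGetD row 0 0, PySem.List.pyGetD row x 0) true) d)
      PySem.Dict.empty
  let num : PySem.Dict Int Int :=
    dataSource.foldl (fun d row =>
      tags.foldl (fun d tag =>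
        if isExist.getD (PySem.List.pyGetD row 0 0, tag) false then
          -- 'if num.get(row[0]):' — truthiness of get: missing (None) and 0 are both falsy
          if d.getD (PySem.List.pyGetD row 0 0) 0 ≠ 0 then
            d.insert (PySem.List.pyGetD row 0 0) (d.getD (PySem.List.pyGetD row 0 0) 0 + 1)
          else d.insert (PySem.List.pyGetD row 0 0) 1
        else d) d)
      PySem.Dict.empty
  let tmp : List (Int × Int) := num.items.map (fun p => (p.2, p.1))
  let tmp := PySem.List.sorted tmp (fun p => p.2) false
  let tmp := PySem.List.sorted tmp (fun p => p.1) true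
  tmp.map (fun p => p.2)

-- ===== PORT B =====
-- 'elems.setdefault(k, set()).update(row[1:])' mutates the stored set in place:
-- as a dict operation that is exactly 'modify k ∅ (update · rest)'.
-- 'count[k]' in the second loop is ported with getD (k is always a key of count there).
def solution_alt (dataSource : List (List Int)) (tags : List Int) : List Int :=
  let st : PySem.Dict Int Int × PySem.Dict Int (PySem.Set Int) :=
    dataSource.foldl (fun s row =>
      (match row with
       | [] => s.1
       | k :: _ => s.1.insert k (s.1.getD k 0 + 1),
       match row with
       | [] => s.2
       | k :: rest => s.2.modify k PySem.Set.empty (fun e => PySem.Set.update e rest)))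
      (PySem.Dict.empty, PySem.Dict.empty)
  let pairs : List (Int × Int) := st.2.items.foldl (fun acc p =>
      let cnt : Int := st.1.getD p.1 0 * ((tags.countP (fun t => PySem.Set.contains p.2 t) : Nat) : Int)
      if cnt ≠ 0 then acc ++ [(cnt, p.1)] else acc) []
  (PySem.List.sorted2 pairs (fun p => -p.1) (fun p => p.2) false).map (fun p => p.2)

-- ===== PRECONDITION & SPEC =====
-- A raises IndexError (row[0] in its counting loop) exactly when tags is nonempty and some row is empty.
def Pre_solution (dataSource : List (List Int)) (tags : List Int) : Prop :=
  tags = [] ∨ ∀ row ∈ dataSource, row ≠ []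
instance (dataSource : List (List Int)) (tags : List Int) : Decidable (Pre_solution dataSource tags) := by unfold Pre_solution; infer_instance
def pvWitness_solution : List (List Int) × List Int := ([[1, 2], [1, 3], [4, 2]], [2, 3])

def Spec_solution (dataSource : List (List Int)) (tags : List Int) (out : List Int) : Prop := out = solution_alt dataSource tags
instance (dataSource : List (List Int)) (tags : List Int) (out : List Int) : Decidable (Spec_solution dataSource tags out) := by unfold Spec_solution; infer_instance

-- ===== CLAIM (what is proved, stated in full; the proofs are below) =====
def Claim_equal_solution : Prop := ∀ (dataSource : List (List Int)) (tags : List Int), Dom_solution dataSource tags → Pre_solution dataSource tags → Spec_solution dataSource tags (solution dataSource tags)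

-- ===== LEMMAS AND PROOFS =====

-- spec-side notions
def pvQual (DS : List (List Int)) (k t : Int) : Bool :=
  DS.any (fun r => decide (r.headI = k) && decide (t ∈ r.tail))

lemma pv_get0 (row : List Int) : PySem.List.pyGetD row 0 0 = row.headI := by
  cases row with
  | nil => rfl
  | cons h t => exact PySem.List.pyGetD_zero_cons h t 0

lemma pv_range_getD_drop (xs : List Int) (j : Nat) :
    (PySem.List.pyRange (j : Int) (xs.length : Int)).map (fun x => PySem.List.pyGetD xs x 0) = xs.drop j := by
  induction hn : xs.length - j generalizing j with
  | zero =>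
    have h : xs.length ≤ j := by omega
    rw [PySem.List.pyRange_one_eq_nil (by exact_mod_cast h)]
    simp [List.drop_eq_nil_of_le h]
  | succ n ih =>
    have hj : j < xs.length := by omega
    rw [PySem.List.pyRange_one_cons (by exact_mod_cast hj)]
    rw [List.map_cons]
    have h1 : ((j : Int) + 1) = ((j + 1 : Nat) : Int) := by push_cast; ring
    rw [h1, ih (j + 1) (by omega)]
    rw [PySem.List.pyGetD_eq_getElem xs 0 (by positivity) (by exact_mod_cast hj)]
    rw [List.drop_eq_getElem_cons hj]
    simp

lemma pv_tail_map (row : List Int) :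
    (PySem.List.pyRange 1 (row.length : Int) 1).map (fun x => PySem.List.pyGetD row x 0) = row.tail := by
  have := pv_range_getD_drop row 1
  simpa [List.drop_one] using this

lemma pv_insert_pairs_getD (h : Int) (xs : List Int) (d : PySem.Dict (Int × Int) Bool) (k t : Int) :
    (xs.foldl (fun d x => d.insert (h, x) true) d).getD (k, t) false
      = (d.getD (k, t) false || (decide (h = k) && decide (t ∈ xs))) := by
  induction xs generalizing d with
  | nil => simp
  | cons y ys ih =>
    rw [List.foldl_cons, ih, PySem.Dict.getD_insert]
    split_ifs with hp
    · have hk : k = h := congrArg Prod.fst hp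
      have ht : t = y := congrArg Prod.snd hp
      subst hk; subst ht
      simp
    · by_cases h1 : h = k
      · have h2 : t ≠ y := fun e => hp (by simp [h1, e])
        simp [h1, h2]
      · simp [h1]

lemma pv_isExist_getD (DS : List (List Int)) (d : PySem.Dict (Int × Int) Bool) (k t : Int) :
    (DS.foldl (fun d row => (PySem.List.pyRange 1 (row.length : Int) 1).foldl
        (fun d x => d.insert (row.headI, PySem.List.pyGetD row x 0) true) d) d).getD (k, t) false
      = (d.getD (k, t) false || pvQual DS k t) := by
  induction DS generalizing d with
  | nil => simp [pvQual]
  | cons row rows ih =>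
    rw [List.foldl_cons, ih]
    have hrw : (PySem.List.pyRange 1 (row.length : Int) 1).foldl
        (fun d x => d.insert (row.headI, PySem.List.pyGetD row x 0) true) d
        = row.tail.foldl (fun d e => d.insert (row.headI, e) true) d := by
      conv_rhs => rw [← pv_tail_map row]
      rw [List.foldl_map]
    rw [hrw, pv_insert_pairs_getD]
    simp [pvQual, Bool.or_assoc]

def pvM (DS : List (List Int)) (tags : List Int) (k : Int) : Nat :=
  tags.countP (fun t => pvQual DS k t)
def pvRC (DS : List (List Int)) (k : Int) : Nat :=
  DS.countP (fun r => decide (r.headI = k))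
def pvCnt (DS : List (List Int)) (tags : List Int) (k : Int) : Int :=
  (pvRC DS k : Int) * (pvM DS tags k : Int)

lemma pv_branch_merge (d : PySem.Dict Int Int) (key : Int) :
    (if d.getD key 0 ≠ 0 then d.insert key (d.getD key 0 + 1) else d.insert key 1)
      = d.insert key (d.getD key 0 + 1) := by
  split_ifs with h
  · rfl
  · rw [not_ne_iff.mp h]; norm_num

lemma pv_rep_insert_getD (k : Int) (l : List Int) (d : PySem.Dict Int Int) (j : Int) :
    (l.foldl (fun d (_ : Int) => d.insert k (d.getD k 0 + 1)) d).getD j 0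
      = d.getD j 0 + (if j = k then (l.length : Int) else 0) := by
  induction l generalizing d with
  | nil => simp
  | cons y ys ih =>
    rw [List.foldl_cons, ih, PySem.Dict.getD_insert]
    split_ifs with h
    · subst h; simp; ring
    · ring

lemma pv_set_update_const (k : Int) (l : List Int) (s : PySem.Set Int) :
    PySem.Set.update s (l.map (fun _ => k)) = if l = [] then s else PySem.Set.add s k := by
  induction l generalizing s with
  | nil => simp [PySem.Set.update_nil]
  | cons y ys ih =>
    rw [List.map_cons, PySem.Set.update_cons, ih]
    have hk : (PySem.Set.add s k).add k = s.add k := PySem.Set.add_of_mem (by simp [PySem.Set.mem_add])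
    by_cases h : ys = [] <;> simp [h, hk]

lemma pv_rep_insert_keys (k : Int) (l : List Int) (d : PySem.Dict Int Int) :
    (l.foldl (fun d (_ : Int) => d.insert k (d.getD k 0 + 1)) d).keys
      = if l = [] then d.keys else PySem.Set.add d.keys k := by
  have h := PySem.Dict.keys_foldl_insert_key l (fun _ => k) (fun d _ => d.getD k 0 + 1) d
  rw [h, pv_set_update_const]

lemma pv_num_getD (DS0 DS : List (List Int)) (tags : List Int) (d : PySem.Dict Int Int) (j : Int) :
    (DS.foldl (fun d row => (tags.filter (fun tag => pvQual DS0 row.headI tag)).foldl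
        (fun d (_ : Int) => d.insert row.headI (d.getD row.headI 0 + 1)) d) d).getD j 0
      = d.getD j 0 + (DS.countP (fun r => decide (r.headI = j)) : Int) * (pvM DS0 tags j : Int) := by
  induction DS generalizing d with
  | nil => simp
  | cons row rows ih =>
    rw [List.foldl_cons, ih, pv_rep_insert_getD, List.countP_cons]
    have hlen : ((tags.filter (fun tag => pvQual DS0 row.headI tag)).length : Int)
        = (pvM DS0 tags row.headI : Int) := by
      simp [pvM, List.countP_eq_length_filter]
    by_cases hj : j = row.headI
    · subst hj
      simp [hlen]
      ring
    · have hd : decide (row.headI = j) = false := by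
        simp only [decide_eq_false_iff_not]
        exact fun h => hj h.symm
      simp [hj, hd]

lemma pv_num_keys (DS0 DS : List (List Int)) (tags : List Int) (d : PySem.Dict Int Int) :
    (DS.foldl (fun d row => (tags.filter (fun tag => pvQual DS0 row.headI tag)).foldl
        (fun d (_ : Int) => d.insert row.headI (d.getD row.headI 0 + 1)) d) d).keys
      = PySem.Set.update d.keys
          ((DS.map (fun r => r.headI)).filter (fun k => decide (pvM DS0 tags k ≠ 0))) := by
  induction DS generalizing d with
  | nil => simp [PySem.Set.update_nil]
  | cons row rows ih =>
    rw [List.foldl_cons, ih, pv_rep_insert_keys]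
    by_cases m0 : pvM DS0 tags row.headI = 0
    · have hnil : tags.filter (fun tag => pvQual DS0 row.headI tag) = [] := by
        have : (tags.filter (fun tag => pvQual DS0 row.headI tag)).length = 0 := by
          simpa [pvM, List.countP_eq_length_filter] using m0
        exact List.length_eq_zero_iff.mp this
      simp [hnil, m0]
    · have hne : ¬ tags.filter (fun tag => pvQual DS0 row.headI tag) = [] := by
        intro hn
        apply m0
        simpa [pvM, List.countP_eq_length_filter] using congrArg List.length hn
      have hif : (if List.filter (fun tag => pvQual DS0 row.headI tag) tags = [] then d.keys
          else PySem.Set.add d.keys row.headI) = PySem.Set.add d.keys row.headI := by simp [hne]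
      rw [hif, List.map_cons, List.filter_cons]
      simp [m0, PySem.Set.update_cons]

lemma pv_filter_foldl_add (p : Int → Bool) (l : List Int) (s : PySem.Set Int) :
    (l.foldl PySem.Set.add s).filter p = (l.filter p).foldl PySem.Set.add (s.filter p) := by
  induction l generalizing s with
  | nil => simp
  | cons x xs ih =>
    rw [List.foldl_cons, ih, List.filter_cons]
    by_cases hp : p x
    · simp only [hp, if_pos, List.foldl_cons]
      congr 1
      rw [PySem.Set.add_eq_ite, PySem.Set.add_eq_ite]
      by_cases hm : x ∈ s
      · simp [hm, List.mem_filter, hp]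
      · simp [hm, List.mem_filter, List.filter_append, hp]
    · simp only [Bool.not_eq_true] at hp
      simp only [hp]
      rw [PySem.Set.add_eq_ite]
      by_cases hm : x ∈ s
      · simp [hm]
      · simp [hm, List.filter_append, hp]

lemma pv_ofList_filter (p : Int → Bool) (l : List Int) :
    PySem.Set.ofList (l.filter p) = (PySem.Set.ofList l).filter p := by
  rw [PySem.Set.ofList_eq_foldl, PySem.Set.ofList_eq_foldl, pv_filter_foldl_add]
  simp

def pvHeads (DS : List (List Int)) : List Int := DS.map (fun r => r.headI)
def pvL (DS : List (List Int)) (tags : List Int) : List (Int × Int) :=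
  ((PySem.Set.ofList (pvHeads DS)).filter (fun k => decide (pvCnt DS tags k ≠ 0))).map
    (fun k => (pvCnt DS tags k, k))

lemma pv_solutionA_eq (DS : List (List Int)) (tags : List Int) :
    solution DS tags
      = (PySem.List.sorted (PySem.List.sorted (pvL DS tags) (fun p => p.2) false)
          (fun p => p.1) true).map (fun p => p.2) := by
  unfold solution
  simp only [pv_get0]
  simp only [pv_isExist_getD, PySem.Dict.getD_empty, Bool.false_or, pv_branch_merge,
    PySem.List.foldl_if_eq_foldl_filter]
  have hkeys : (DS.foldl (fun d row => (tags.filter (fun tag => pvQual DS row.headI tag)).foldl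
      (fun d (_ : Int) => d.insert row.headI (d.getD row.headI 0 + 1)) d)
      (PySem.Dict.empty : PySem.Dict Int Int)).keys
      = PySem.Set.ofList ((pvHeads DS).filter (fun k => decide (pvM DS tags k ≠ 0))) := by
    simp only [pv_num_keys, PySem.Dict.keys_empty, PySem.Set.update_nil_left, pvHeads]
  have hnodup : (DS.foldl (fun d row => (tags.filter (fun tag => pvQual DS row.headI tag)).foldl
      (fun d (_ : Int) => d.insert row.headI (d.getD row.headI 0 + 1)) d)
      (PySem.Dict.empty : PySem.Dict Int Int)).keys.Nodup := by
    rw [hkeys]; exact PySem.Set.nodup_ofList _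
  have hitems := PySem.Dict.items_eq_map_keys _ hnodup 0
  rw [hkeys] at hitems
  simp only [pv_num_getD, PySem.Dict.getD_empty, zero_add] at hitems
  have hfc : (pvHeads DS).filter (fun k => decide (pvM DS tags k ≠ 0))
      = (pvHeads DS).filter (fun k => decide (pvCnt DS tags k ≠ 0)) := by
    apply List.filter_congr
    intro k hk
    have hrc : pvRC DS k ≠ 0 := by
      obtain ⟨r, hr, hrk⟩ := List.mem_map.mp (by simpa [pvHeads] using hk)
      intro h0
      simp only [pvRC, List.countP_eq_zero] at h0
      exact h0 r hr (by simp [hrk])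
    simp only [decide_eq_decide]
    unfold pvCnt
    constructor
    · intro hm
      exact mul_ne_zero (by exact_mod_cast hrc) (by exact_mod_cast hm)
    · intro hc hm0
      exact hc (by rw [hm0]; ring)
  rw [hfc] at hitems
  simp only [hitems, List.map_map, Function.comp_def, pvL, pvCnt, pvRC, pv_ofList_filter]

lemma pv_count_getD (DS : List (List Int)) (d : PySem.Dict Int Int) (j : Int) :
    (DS.foldl (fun d row => match row with
        | [] => d
        | k :: _ => d.insert k (d.getD k 0 + 1)) d).getD j 0
      = d.getD j 0 + (DS.countP (fun r => decide (r ≠ []) && decide (r.headI = j)) : Int) := by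
  induction DS generalizing d with
  | nil => simp
  | cons row rows ih =>
    rw [List.foldl_cons, ih, List.countP_cons]
    cases row with
    | nil => simp
    | cons h rest =>
      rw [PySem.Dict.getD_insert]
      by_cases hj : j = h
      · subst hj; simp; ring
      · have hd : decide ((h :: rest).headI = j) = false := by
          simp only [List.headI, decide_eq_false_iff_not]
          exact fun e => hj (Eq.symm e)
        simp only [hd]
        simp [hj]

lemma pv_elems_mem (DS : List (List Int)) (d : PySem.Dict Int (PySem.Set Int)) (k t : Int) :
    t ∈ (DS.foldl (fun d row => match row with
        | [] => d
        | h :: rest => d.modify h PySem.Set.empty (fun e => PySem.Set.update e rest)) d).getD k PySem.Set.empty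
      ↔ (t ∈ d.getD k PySem.Set.empty ∨ pvQual DS k t = true) := by
  induction DS generalizing d with
  | nil => simp [pvQual]
  | cons row rows ih =>
    rw [List.foldl_cons]
    cases row with
    | nil =>
      rw [ih]
      simp [pvQual, List.headI]
    | cons h rest =>
      rw [ih, PySem.Dict.getD_modify]
      by_cases hk : k = h
      · subst hk
        simp [PySem.Set.mem_update, pvQual, List.headI, or_assoc]
      · have hd : decide ((h :: rest).headI = k) = false := by
          simp only [List.headI, decide_eq_false_iff_not]
          exact fun e => hk (Eq.symm e)
        simp [hk, pvQual, List.headI,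
          eq_false (show ¬ (h = k) from fun e => hk (Eq.symm e))]

lemma pv_keys_insert_add (d : PySem.Dict Int (PySem.Set Int)) (k : Int) (v : PySem.Set Int) :
    (d.insert k v).keys = PySem.Set.add d.keys k := by
  by_cases hc : d.contains k = true
  · rw [PySem.Dict.keys_insert_of_contains _ _ hc,
      PySem.Set.add_of_mem (by simpa [PySem.Dict.contains_eq_decide_mem_keys] using hc)]
  · rw [PySem.Dict.keys_insert_of_not_contains _ _ (by simpa using hc),
      PySem.Set.add_of_not_mem (fun hm => hc (by simpa [PySem.Dict.contains_eq_decide_mem_keys] using hm))]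

lemma pv_elems_keys (DS : List (List Int)) (d : PySem.Dict Int (PySem.Set Int)) :
    (DS.foldl (fun d row => match row with
        | [] => d
        | h :: rest => d.modify h PySem.Set.empty (fun e => PySem.Set.update e rest)) d).keys
      = PySem.Set.update d.keys ((DS.filter (fun r => decide (r ≠ []))).map (fun r => r.headI)) := by
  induction DS generalizing d with
  | nil => simp [PySem.Set.update_nil]
  | cons row rows ih =>
    rw [List.foldl_cons]
    cases row with
    | nil =>
      rw [ih]
      simp
    | cons h rest =>
      rw [ih, PySem.Dict.keys_modify, pv_keys_insert_add, List.filter_cons]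
      simp [List.headI, PySem.Set.update_cons]

lemma pv_solutionB_eq (DS : List (List Int)) (tags : List Int)
    (h : DS.filter (fun r => decide (r ≠ [])) = DS) :
    solution_alt DS tags
      = (PySem.List.sorted2 (pvL DS tags) (fun p => -p.1) (fun p => p.2) false).map
          (fun p => p.2) := by
  unfold solution_alt
  rw [PySem.List.foldl_prod_mk
    (f := fun (d : PySem.Dict Int Int) (row : List Int) => match row with
      | [] => d
      | k :: _ => d.insert k (d.getD k 0 + 1))
    (g := fun (d : PySem.Dict Int (PySem.Set Int)) (row : List Int) => match row with
      | [] => d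
      | k :: rest => d.modify k PySem.Set.empty (fun e => PySem.Set.update e rest))]
  have hkeys : (DS.foldl (fun d row => match row with
      | [] => d
      | k :: rest => d.modify k PySem.Set.empty (fun e => PySem.Set.update e rest))
      (PySem.Dict.empty : PySem.Dict Int (PySem.Set Int))).keys
      = PySem.Set.ofList (pvHeads DS) := by
    rw [pv_elems_keys, h]
    simp [PySem.Set.update_nil_left, pvHeads]
  have hnodup : (DS.foldl (fun d row => match row with
      | [] => d
      | k :: rest => d.modify k PySem.Set.empty (fun e => PySem.Set.update e rest))
      (PySem.Dict.empty : PySem.Dict Int (PySem.Set Int))).keys.Nodup := by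
    rw [hkeys]; exact PySem.Set.nodup_ofList _
  have hitems := PySem.Dict.items_eq_map_keys _ hnodup PySem.Set.empty
  rw [hkeys] at hitems
  have hall : ∀ r ∈ DS, decide (r ≠ []) = true := List.filter_eq_self.mp h
  have hcount : ∀ k : Int, (DS.foldl (fun d row => match row with
      | [] => d
      | k :: _ => d.insert k (d.getD k 0 + 1)) (PySem.Dict.empty : PySem.Dict Int Int)).getD k 0
      = (pvRC DS k : Int) := by
    intro k
    rw [pv_count_getD]
    have : DS.countP (fun r => decide (r ≠ []) && decide (r.headI = k))
        = DS.countP (fun r => decide (r.headI = k)) := by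
      apply List.countP_congr
      intro r hr
      have h1 := hall r hr
      simp only [decide_eq_true_eq] at h1
      simp [h1]
    rw [PySem.Dict.getD_empty, this, zero_add]
    simp [pvRC]
  have hcont : ∀ (k t : Int), PySem.Set.contains ((DS.foldl (fun d row => match row with
      | [] => d
      | k :: rest => d.modify k PySem.Set.empty (fun e => PySem.Set.update e rest))
      (PySem.Dict.empty : PySem.Dict Int (PySem.Set Int))).getD k PySem.Set.empty) t
      = pvQual DS k t := by
    intro k t
    rw [PySem.Set.contains_eq_decide]
    have hmem := pv_elems_mem DS PySem.Dict.empty k t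
    rw [PySem.Dict.getD_empty] at hmem
    cases hq : pvQual DS k t
    · simp only [hq, decide_eq_false_iff_not]
      intro hc
      have hor := hmem.mp hc
      simp [PySem.Set.empty, hq] at hor
    · simp only [hq, decide_eq_true_eq]
      exact hmem.mpr (Or.inr hq)
  simp only [hitems]
  simp only [PySem.List.foldl_append_ite, List.nil_append, List.filter_map, List.map_map]
  simp only [Function.comp_def, hcount, hcont]
  simp only [pvL, pvCnt, pvM]
  rfl

lemma pv_solutionB_nil (DS : List (List Int)) : solution_alt DS [] = [] := by
  unfold solution_alt
  simp [List.countP_nil]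
  rfl

lemma pvL_nil (DS : List (List Int)) : pvL DS [] = [] := by
  simp [pvL, pvCnt, pvM]

def pvRle (a b : Int × Int) : Prop := b.1 < a.1 ∨ (a.1 = b.1 ∧ a.2 ≤ b.2)

def pvBefA : (Int × Int) → (Int × Int) → Bool := fun a b => decide (b.1 < a.1)
def pvBefB : (Int × Int) → (Int × Int) → Bool := fun a b =>
  decide (-a.1 < -b.1) || (!decide (-b.1 < -a.1) && decide (a.2 < b.2))

lemma pvRle_trans {a b c : Int × Int} (h1 : pvRle a b) (h2 : pvRle b c) : pvRle a c := by
  rcases h1 with h1 | ⟨h1, h1'⟩ <;> rcases h2 with h2 | ⟨h2, h2'⟩ <;>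
    simp only [pvRle] <;> omega

lemma pv_antisymm (a b : Int × Int) (h1 : pvRle a b) (h2 : pvRle b a) : a = b := by
  rcases a with ⟨a1, a2⟩; rcases b with ⟨b1, b2⟩
  rcases h1 with h1 | ⟨h1, h1'⟩ <;> rcases h2 with h2 | ⟨h2, h2'⟩ <;>
    simp_all <;> omega

lemma pv_insertBy_cons (bef : (Int × Int) → (Int × Int) → Bool) (x y : Int × Int) (ys : List (Int × Int)) :
    PySem.List.insertBy bef x (y :: ys)
      = if bef x y then x :: y :: ys else y :: PySem.List.insertBy bef x ys := by
  rfl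

lemma pv_insA (x : Int × Int) (ys : List (Int × Int)) (hys : ys.Pairwise pvRle)
    (hstab : ∀ y ∈ ys, x.1 = y.1 → y.2 ≤ x.2) :
    (PySem.List.insertBy pvBefA x ys).Pairwise pvRle := by
  induction ys with
  | nil => simp [PySem.List.insertBy]
  | cons y ys ih =>
    rw [pv_insertBy_cons]
    rcases List.pairwise_cons.mp hys with ⟨hy, hys'⟩
    by_cases hb : pvBefA x y = true
    · rw [if_pos hb]
      have hxy : y.1 < x.1 := by simpa [pvBefA] using hb
      refine List.Pairwise.cons ?_ hys
      intro z hz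
      rcases List.mem_cons.mp hz with rfl | hz
      · exact Or.inl hxy
      · have := hy z hz
        rcases this with h | ⟨h, _⟩
        · exact Or.inl (by omega)
        · exact Or.inl (by omega)
    · rw [if_neg hb]
      have hxy : x.1 ≤ y.1 := by
        have := (by simpa [pvBefA] using hb : ¬ y.1 < x.1)
        omega
      refine List.Pairwise.cons ?_ (ih hys' (fun z hz h => hstab z (List.mem_cons_of_mem _ hz) h))
      intro z hz
      rcases (PySem.List.insertBy_mem_iff _ _ _ _).mp hz with rfl | hz
      · rcases lt_or_eq_of_le hxy with h | h
        · exact Or.inl h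
        · exact Or.inr ⟨h.symm, hstab y (List.mem_cons_self) h⟩
      · exact hy z hz

lemma pv_foldA (L1 : List (Int × Int)) : ∀ (acc : List (Int × Int)),
    acc.Pairwise pvRle →
    (∀ y ∈ acc, ∀ z ∈ L1, z.1 = y.1 → y.2 ≤ z.2) →
    L1.Pairwise (fun a b => a.1 = b.1 → a.2 ≤ b.2) →
    (L1.foldl (fun acc x => PySem.List.insertBy pvBefA x acc) acc).Pairwise pvRle := by
  induction L1 with
  | nil => intro acc h _ _; simpa using h
  | cons x L1' ih =>
    intro acc hacc hcross hL
    rcases List.pairwise_cons.mp hL with ⟨hx, hL'⟩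
    rw [List.foldl_cons]
    apply ih
    · exact pv_insA x acc hacc (fun y hy h => hcross y hy x (List.mem_cons_self) h)
    · intro y hy z hz hzy
      rcases (PySem.List.insertBy_mem_iff _ _ _ _).mp hy with rfl | hy
      · exact hx z hz hzy.symm
      · exact hcross y hy z (List.mem_cons_of_mem _ hz) hzy
    · exact hL'

lemma pv_insB (x : Int × Int) (ys : List (Int × Int)) (hys : ys.Pairwise pvRle) :
    (PySem.List.insertBy pvBefB x ys).Pairwise pvRle := by
  induction ys with
  | nil => simp [PySem.List.insertBy]
  | cons y ys ih =>
    rw [pv_insertBy_cons]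
    rcases List.pairwise_cons.mp hys with ⟨hy, hys'⟩
    by_cases hb : pvBefB x y = true
    · rw [if_pos hb]
      have hxy : pvRle x y := by
        have := hb
        simp only [pvBefB, Bool.or_eq_true, Bool.and_eq_true, Bool.not_eq_true',
          decide_eq_true_eq, decide_eq_false_iff_not] at this
        rcases this with h | ⟨h1, h2⟩
        · exact Or.inl (by omega)
        · by_cases hlt : y.1 < x.1
          · exact Or.inl hlt
          · exact Or.inr ⟨by omega, le_of_lt h2⟩
      refine List.Pairwise.cons ?_ hys
      intro z hz
      rcases List.mem_cons.mp hz with rfl | hz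
      · exact hxy
      · exact pvRle_trans hxy (hy z hz)
    · rw [if_neg hb]
      have hyx : pvRle y x := by
        have := hb
        simp only [pvBefB, Bool.or_eq_true, Bool.and_eq_true, Bool.not_eq_true',
          decide_eq_true_eq, decide_eq_false_iff_not] at this
        rcases not_or.mp this with ⟨h1, h2⟩
        rcases not_and_or.mp h2 with h2' | h2'
        · exact Or.inl (by omega)
        · by_cases hlt : x.1 < y.1
          · exact Or.inl hlt
          · exact Or.inr ⟨by omega, by omega⟩
      refine List.Pairwise.cons ?_ (ih hys')
      intro z hz
      rcases (PySem.List.insertBy_mem_iff _ _ _ _).mp hz with rfl | hz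
      · exact hyx
      · exact hy z hz

lemma pv_foldB (X : List (Int × Int)) : ∀ (acc : List (Int × Int)),
    acc.Pairwise pvRle →
    (X.foldl (fun acc x => PySem.List.insertBy pvBefB x acc) acc).Pairwise pvRle := by
  induction X with
  | nil => intro acc h; simpa using h
  | cons x X' ih =>
    intro acc hacc
    rw [List.foldl_cons]
    exact ih _ (pv_insB x acc hacc)

lemma pv_sortA_pairwise (X : List (Int × Int)) :
    (PySem.List.sorted (PySem.List.sorted X (fun p => p.2) false) (fun p => p.1) true).Pairwise pvRle := by
  rw [PySem.List.sorted_rev_eq_foldl_insertBy]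
  have hp := PySem.List.sorted_pairwise X (fun p => p.2)
  have hp' : (PySem.List.sorted X (fun p => p.2) false).Pairwise
      (fun a b => a.1 = b.1 → a.2 ≤ b.2) := hp.imp (fun {a b} h (_ : a.1 = b.1) => h)
  exact pv_foldA _ [] (by simp) (by simp) hp'

lemma pv_sortB_pairwise (X : List (Int × Int)) :
    (PySem.List.sorted2 X (fun p => -p.1) (fun p => p.2) false).Pairwise pvRle := by
  show (X.foldl (fun acc x => PySem.List.insertBy pvBefB x acc) []).Pairwise pvRle
  exact pv_foldB X [] (by simp)

lemma pv_sortAB (X : List (Int × Int)) :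
    PySem.List.sorted (PySem.List.sorted X (fun p => p.2) false) (fun p => p.1) true
      = PySem.List.sorted2 X (fun p => -p.1) (fun p => p.2) false := by
  apply List.Perm.eq_of_pairwise (le := pvRle)
    (fun a b _ _ h1 h2 => pv_antisymm a b h1 h2)
    (pv_sortA_pairwise X) (pv_sortB_pairwise X)
  exact ((PySem.List.sorted_perm _ _ _).trans (PySem.List.sorted_perm _ _ _)).trans
    (PySem.List.sorted2_perm X _ _ _).symm

theorem pv_main (DS : List (List Int)) (tags : List Int)
    (hpre : tags = [] ∨ ∀ row ∈ DS, row ≠ []) : solution DS tags = solution_alt DS tags := by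
  rcases hpre with rfl | hrows
  · rw [pv_solutionA_eq, pvL_nil, pv_solutionB_nil]
    rfl
  · have hfil : DS.filter (fun r => decide (r ≠ [])) = DS :=
      List.filter_eq_self.mpr (fun r hr => by simp [hrows r hr])
    rw [pv_solutionA_eq, pv_solutionB_eq DS tags hfil, pv_sortAB]


-- ===== VERDICT (by name: the statement is the Claim_ definition above) =====
theorem solution_spec : Claim_equal_solution := by
  intro dataSource tags _ hpre
  unfold Spec_solution
  unfold Pre_solution at hpre
  exact pv_main dataSource tags hpre
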